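-- pv_equiv track=rewrite | github.com/ChikkaLokeshPrasad/fdia-detection-cnn-ensemble-xai-smart-grid | data/data_loader.py | define_zones
-- ===== SOURCE A (Python) =====
-- def define_zones(n_buses):
--     """
--     Simple zone definition: split buses into ~3-bus zones.
--     You can replace this with the exact zones from the paper if needed.
--     """
--     n_zones = max(2, n_buses // 3)
--     sizes = [n_buses // n_zones] * n_zones
--     for i in range(n_buses % n_zones):
--         sizes[i] += 1
--     zones = []
--     idx = 0
--     for s in sizes:
--         zones.append(list(range(idx, idx + s)))
--         idx += s
--     return zones
-- ===== SOURCE B (Python) =====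
-- def define_zones(n_buses):
--     """
--     Simple zone definition: split buses into ~3-bus zones.
--     Closed-form variant: each zone's start and size are computed directly
--     from its index instead of threading a running offset.
--     """
--     n_zones = max(2, n_buses // 3)
--     base = n_buses // n_zones
--     rem = n_buses % n_zones
--     return [list(range(i * base + min(i, rem),
--                        i * base + min(i, rem) + base + (1 if i < rem else 0)))
--             for i in range(n_zones)]
-- ===== Notes on version B (the rewrite author's own statement) =====
-- stated objective: simpler
-- what changed: Replaces the intermediate sizes array and the sequential running-offset accumulator with a single comprehension that derives each zone's start (i*base+min(i,rem)) and size (base + 1 if i<rem) in closed form from its index.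
import Mathlib
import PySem

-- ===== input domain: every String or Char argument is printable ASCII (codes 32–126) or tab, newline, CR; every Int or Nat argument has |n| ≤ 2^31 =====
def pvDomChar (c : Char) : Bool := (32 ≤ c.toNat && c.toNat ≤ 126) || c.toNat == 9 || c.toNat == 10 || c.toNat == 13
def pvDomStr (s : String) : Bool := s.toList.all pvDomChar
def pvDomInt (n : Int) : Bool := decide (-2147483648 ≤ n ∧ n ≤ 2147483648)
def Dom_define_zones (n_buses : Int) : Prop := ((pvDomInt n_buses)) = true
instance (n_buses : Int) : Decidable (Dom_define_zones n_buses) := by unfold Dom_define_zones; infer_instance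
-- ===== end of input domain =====

-- B replaces A's sizes array and running offset by a closed-form start/size per zone index (objective: simpler).

-- ===== PORT A =====
def define_zones (n_buses : Int) : List (List Int) :=
  let n_zones : Int := max 2 (PySem.Int.floordiv n_buses 3)
  let sizes0 : List Int := List.replicate n_zones.toNat (PySem.Int.floordiv n_buses n_zones)
  let sizes : List Int :=
    (PySem.List.pyRange 0 (PySem.Int.mod n_buses n_zones) 1).foldl
      (fun sz i => sz.modify i.toNat (· + 1)) sizes0
  let st : List (List Int) × Int :=
    sizes.foldl (fun acc s => (acc.1 ++ [PySem.List.pyRange acc.2 (acc.2 + s) 1], acc.2 + s)) ([], 0)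
  st.1

-- ===== PORT B =====
def define_zones_alt (n_buses : Int) : List (List Int) :=
  let n_zones : Int := max 2 (PySem.Int.floordiv n_buses 3)
  let base : Int := PySem.Int.floordiv n_buses n_zones
  let rem : Int := PySem.Int.mod n_buses n_zones
  (List.range n_zones.toNat).map (fun (i : Nat) =>
    PySem.List.pyRange ((i : Int) * base + min (i : Int) rem)
      ((i : Int) * base + min (i : Int) rem + base + (if (i : Int) < rem then 1 else 0)) 1)

-- ===== PRECONDITION & SPEC =====
def Spec_define_zones (n_buses : Int) (out : List (List Int)) : Prop := out = define_zones_alt n_buses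
instance (n_buses : Int) (out : List (List Int)) : Decidable (Spec_define_zones n_buses out) := by unfold Spec_define_zones; infer_instance

-- ===== CLAIM (what is proved, stated in full; the proofs are below) =====
def Claim_equal_define_zones : Prop := ∀ (n_buses : Int), Dom_define_zones n_buses → Spec_define_zones n_buses (define_zones n_buses)

-- ===== LEMMAS AND PROOFS =====

/-- The `sizes` list after A's increment loop, in closed form. -/
theorem sizes_closed (base : Int) (r N : Nat) (hrN : r ≤ N) :
    (PySem.List.pyRange 0 (r : Int) 1).foldl (fun sz i => sz.modify i.toNat (· + 1))
        (List.replicate N base)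
      = (List.range N).map (fun (i : Nat) => base + if i < r then 1 else 0) := by
  induction r with
  | zero =>
      rw [PySem.List.pyRange_one_eq_nil (by omega)]
      simp [List.map_const']
  | succ r ih =>
      have hsplit : PySem.List.pyRange 0 ((r + 1 : Nat) : Int) 1
          = PySem.List.pyRange 0 (r : Int) 1 ++ [(r : Int)] := by
        have : ((r + 1 : Nat) : Int) = (r : Int) + 1 := by push_cast; ring
        rw [this, PySem.List.pyRange_one_succ_right (by omega)]
      rw [hsplit, List.foldl_append, ih (by omega)]
      simp only [List.foldl_cons, List.foldl_nil, Int.toNat_natCast]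
      apply List.ext_getElem
      · simp
      · intro k h1 h2
        rw [List.getElem_modify]
        simp only [List.getElem_map, List.getElem_range]
        split_ifs <;> omega

/-- A's zone-building fold over the closed-form sizes equals B's comprehension. -/
theorem zones_closed (base rem : Int) (hrem : 0 ≤ rem) (N : Nat) :
    ((List.range N).map (fun (i : Nat) => base + if (i : Int) < rem then 1 else 0)).foldl
        (fun (acc : List (List Int) × Int) s =>
          (acc.1 ++ [PySem.List.pyRange acc.2 (acc.2 + s) 1], acc.2 + s)) ([], 0)
      = ((List.range N).map (fun (i : Nat) =>
            PySem.List.pyRange ((i : Int) * base + min (i : Int) rem)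
              ((i : Int) * base + min (i : Int) rem + base + (if (i : Int) < rem then 1 else 0)) 1),
         (N : Int) * base + min (N : Int) rem) := by
  induction N with
  | zero => simp [min_eq_left hrem]
  | succ N ih =>
      rw [List.range_succ, List.map_append, List.foldl_append, ih]
      simp only [List.map_cons, List.map_nil, List.foldl_cons, List.foldl_nil, Prod.mk.injEq]
      refine ⟨?_, ?_⟩
      · rw [List.map_append]
        congr 1
        simp only [List.map_cons, List.map_nil]
        congr 2
        ring
      · push_cast
        rcases lt_or_ge (N : Int) rem with h | h
        · rw [if_pos h, min_eq_left (by omega), min_eq_left (by omega)]; ring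
        · rw [if_neg (by omega), min_eq_right h, min_eq_right (by omega)]; ring

-- ===== VERDICT (by name: the statement is the Claim_ definition above) =====
theorem define_zones_spec : Claim_equal_define_zones := by
  intro n _
  unfold Spec_define_zones define_zones define_zones_alt
  simp only []
  set nz : Int := max 2 (PySem.Int.floordiv n 3) with hnz
  have hnzpos : 0 < nz := lt_of_lt_of_le (by norm_num) (le_max_left _ _)
  set base : Int := PySem.Int.floordiv n nz with hbase
  set rem : Int := PySem.Int.mod n nz with hrem
  have hmod : rem = n % nz := PySem.Int.mod_eq_emod_of_pos hnzpos
  have hr0 : 0 ≤ rem := by rw [hmod]; exact Int.emod_nonneg _ (by omega)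
  have hrlt : rem < nz := by rw [hmod]; exact Int.emod_lt_of_pos _ hnzpos
  have hcast : ((rem.toNat : Nat) : Int) = rem := Int.toNat_of_nonneg hr0
  have hle : rem.toNat ≤ nz.toNat := by omega
  have hsz := sizes_closed base rem.toNat nz.toNat hle
  rw [hcast] at hsz
  have hbridge : (List.range nz.toNat).map (fun (i : Nat) => base + if i < rem.toNat then 1 else 0)
      = (List.range nz.toNat).map (fun (i : Nat) => base + if (i : Int) < rem then 1 else 0) := by
    apply List.map_congr_left
    intro i _
    congr 1
    rcases Nat.lt_or_ge i rem.toNat with h | h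
    · rw [if_pos h, if_pos (by omega)]
    · rw [if_neg (by omega), if_neg (by omega)]
  rw [hsz, hbridge, zones_closed base rem hr0 nz.toNat]
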